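-- pv_equiv track=rewrite | github.com/Maxhu787/scripts | py/1/APCS-10503-檢測題解/c-6xxx.py | f
-- ===== SOURCE A (Python) =====
-- def f(n):
--     c=0
--     sum=0
--     if n<2 : return 0
--     for i in range(1,n+1):
--         c += 1
--         sum =sum + i
--     sum += f(int(2*n/3))
--     return sum
-- ===== SOURCE B (Python) =====
-- def f(n):
--     # O(log n): closed form n*(n+1)//2 per level, iterative instead of loop+recursion
--     total = 0
--     while n >= 2:
--         total += n * (n + 1) // 2
--         n = 2 * n // 3
--     return total
-- ===== Notes on version B (the rewrite author's own statement) =====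
-- stated objective: faster
-- what changed: Replaced the inner 1..n summation loop by the closed form n*(n+1)//2 and the recursion by an iterative accumulator loop over n -> 2n//3, so total work drops from O(n) loop iterations to O(log n).
import Mathlib
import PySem

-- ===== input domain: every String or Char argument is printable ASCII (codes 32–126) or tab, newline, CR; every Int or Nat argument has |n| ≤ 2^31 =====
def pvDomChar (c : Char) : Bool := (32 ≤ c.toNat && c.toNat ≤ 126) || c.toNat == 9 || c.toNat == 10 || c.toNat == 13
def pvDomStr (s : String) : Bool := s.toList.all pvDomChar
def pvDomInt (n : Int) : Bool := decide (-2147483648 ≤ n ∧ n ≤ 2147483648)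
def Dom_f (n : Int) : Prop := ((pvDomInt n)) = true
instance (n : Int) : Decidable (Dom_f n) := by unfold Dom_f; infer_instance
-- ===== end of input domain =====

-- B replaces A's inner summation loop by the closed form n*(n+1)//2 and the recursion by an
-- accumulator loop, making it O(log n) instead of O(n) total loop iterations (objective: faster).

-- ===== PORT A =====
-- int(2*n/3): here n ≥ 2, so 2*n/3 > 0 and truncation = floor; the float quotient is exact
-- enough on |n| ≤ 2^31 that int(2*n/3) = (2*n)//3, ported as PySem.Int.floordiv.
def f (n : Int) : Int :=
  if n < 2 then 0
  else
    ((PySem.List.pyRange 1 (n + 1) 1).foldl (fun s i => s + i) 0)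
      + f (PySem.Int.floordiv (2 * n) 3)
termination_by n.toNat
decreasing_by
  rename_i h
  have h3 : (0:Int) < 3 := by norm_num
  rw [PySem.Int.floordiv_eq_ediv_of_pos h3]
  omega

-- ===== PORT B =====
-- B's while-loop with accumulator `total`, as structural recursion on the loop variable.
def fAltGo (n total : Int) : Int :=
  if n ≥ 2 then
    fAltGo (PySem.Int.floordiv (2 * n) 3) (total + PySem.Int.floordiv (n * (n + 1)) 2)
  else total
termination_by n.toNat
decreasing_by
  rename_i h
  have h3 : (0:Int) < 3 := by norm_num
  rw [PySem.Int.floordiv_eq_ediv_of_pos h3]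
  omega

def f_alt (n : Int) : Int := fAltGo n 0

-- ===== PRECONDITION & SPEC =====
def Spec_f (n : Int) (out : Int) : Prop := out = f_alt n
instance (n : Int) (out : Int) : Decidable (Spec_f n out) := by unfold Spec_f; infer_instance

-- ===== CLAIM (what is proved, stated in full; the proofs are below) =====
def Claim_equal_f : Prop := ∀ (n : Int), Dom_f n → Spec_f n (f n)

-- ===== LEMMAS AND PROOFS =====

-- Doubled sum of 1..n via the fold, avoiding division in the induction.
theorem pv_two_sum (m : Nat) :
    2 * (PySem.List.pyRange 1 ((m : Int) + 1) 1).foldl (fun s i => s + i) 0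
      = (m : Int) * ((m : Int) + 1) := by
  induction m with
  | zero => simp [PySem.List.pyRange_one_eq_nil]
  | succ k ih =>
    have hk : (1:Int) ≤ (k:Int) + 1 := by omega
    rw [show ((k + 1 : Nat) : Int) = (k:Int) + 1 by push_cast; ring,
        PySem.List.pyRange_one_succ_right hk, List.foldl_append]
    simp only [List.foldl]
    nlinarith [ih]

-- Sum of 1..n via the fold equals the closed form (for 0 ≤ n).
theorem pv_sum_range (n : Int) (hn : 0 ≤ n) :
    (PySem.List.pyRange 1 (n + 1) 1).foldl (fun s i => s + i) 0
      = PySem.Int.floordiv (n * (n + 1)) 2 := by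
  have h2 : (0:Int) < 2 := by norm_num
  rw [PySem.Int.floordiv_eq_ediv_of_pos h2]
  obtain ⟨m, rfl⟩ := Int.eq_ofNat_of_zero_le hn
  rw [← pv_two_sum m, Int.mul_ediv_cancel_left _ (by norm_num)]

-- The accumulator factors out of fAltGo.
theorem pv_go_acc (n : Int) : ∀ total : Int, fAltGo n total = total + fAltGo n 0 := by
  induction n using f.induct with
  | case1 n h =>
    intro t
    conv_lhs => rw [fAltGo]
    conv_rhs => rw [fAltGo]
    rw [if_neg (show ¬ n ≥ 2 by omega), if_neg (show ¬ n ≥ 2 by omega)]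
    ring
  | case2 n h ih =>
    intro t
    conv_lhs => rw [fAltGo]
    conv_rhs => rw [fAltGo]
    rw [if_pos (show n ≥ 2 by omega), if_pos (show n ≥ 2 by omega), zero_add,
        ih (t + PySem.Int.floordiv (n * (n + 1)) 2), ih (PySem.Int.floordiv (n * (n + 1)) 2)]
    ring

theorem pv_f_eq (n : Int) : f n = f_alt n := by
  unfold f_alt
  induction n using f.induct with
  | case1 n h =>
    rw [f, if_pos h, fAltGo, if_neg (by omega)]
  | case2 n h ih =>
    rw [f, if_neg h, fAltGo, if_pos (by omega),
        pv_go_acc, pv_sum_range n (by omega), ih]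
    ring

-- ===== VERDICT (by name: the statement is the Claim_ definition above) =====
theorem f_spec : Claim_equal_f := by
  intro n _
  unfold Spec_f
  exact pv_f_eq n
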